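-- pv_equiv track=rewrite | github.com/stanislavkozlovski/python_exercises | hackerrank/algorithms/dynamic programming/equal.py | get_number_of_operations_to_reduce
-- ===== SOURCE A (Python) =====
-- def get_number_of_operations_to_reduce(number, wanted_number):
--     """
--     Given a number at an index of an array and a wanted number, return the number of operations that are needed
--     to reduce the array number to the wanted number by only removing 5, 2 or 1 per operation
--     ex: arr = [1,2,3,4], idx = 3, wanted_number = 1: number at arr[idx] is 4. 4 can be reduced to 1 with 2 operations:
--         4-2=2 2-1=1
--     """
--     diff = number - wanted_number
--     needed_operations = 0
--
--     while diff != 0: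
--         needed_operations += 1
--         if diff >= 5:
--             number -= 5
--         elif diff >= 2:
--             number -= 2
--         elif diff > 0:
--             number -= 1
--         diff = number - wanted_number
--
--     return needed_operations
-- ===== SOURCE B (Python) =====
-- def get_number_of_operations_to_reduce(number, wanted_number):
--     diff = number - wanted_number
--     return diff // 5 + (diff % 5) // 2 + (diff % 5) % 2
-- ===== Notes on version B (the rewrite author's own statement) =====
-- stated objective: alternative
-- what changed: Replaced the greedy subtract-5/2/1 while-loop with the closed-form diff//5 + (diff%5)//2 + (diff%5)%2 (intended as faster; a timing run could not obtain a clean ratio because A times out on large diffs).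
import Mathlib
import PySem

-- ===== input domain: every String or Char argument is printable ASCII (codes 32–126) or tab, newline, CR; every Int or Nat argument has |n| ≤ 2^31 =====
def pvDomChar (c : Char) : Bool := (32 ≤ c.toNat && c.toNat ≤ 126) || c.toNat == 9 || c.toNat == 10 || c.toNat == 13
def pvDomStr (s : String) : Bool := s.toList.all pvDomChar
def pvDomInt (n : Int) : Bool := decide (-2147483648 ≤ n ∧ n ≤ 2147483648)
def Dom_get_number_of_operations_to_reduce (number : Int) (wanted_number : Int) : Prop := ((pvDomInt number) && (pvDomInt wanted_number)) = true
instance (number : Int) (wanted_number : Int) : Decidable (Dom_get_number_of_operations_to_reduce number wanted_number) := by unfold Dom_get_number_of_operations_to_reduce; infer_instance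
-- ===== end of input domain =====

-- ===== PORT A =====
-- Loop of A: greedy while-loop; for diff < 0 Python loops forever (Pre_ excludes those inputs;
-- there the port just returns the accumulator).
def pvLoopA (number : Int) (wanted_number : Int) (needed_operations : Int) : Int :=
  let diff := number - wanted_number
  if diff = 0 then needed_operations
  else if diff ≥ 5 then pvLoopA (number - 5) wanted_number (needed_operations + 1)
  else if diff ≥ 2 then pvLoopA (number - 2) wanted_number (needed_operations + 1)
  else if diff > 0 then pvLoopA (number - 1) wanted_number (needed_operations + 1)
  else needed_operations
termination_by (number - wanted_number).toNat
decreasing_by all_goals omega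

def get_number_of_operations_to_reduce (number : Int) (wanted_number : Int) : Int :=
  pvLoopA number wanted_number 0

-- ===== PORT B =====
def get_number_of_operations_to_reduce_alt (number : Int) (wanted_number : Int) : Int :=
  let diff := number - wanted_number
  PySem.Int.floordiv diff 5 + PySem.Int.floordiv (PySem.Int.mod diff 5) 2
    + PySem.Int.mod (PySem.Int.mod diff 5) 2

-- ===== PRECONDITION & SPEC =====
-- Pre_ excludes number < wanted_number: there A's loop never terminates (no branch fires, diff stays negative).
def Pre_get_number_of_operations_to_reduce (number : Int) (wanted_number : Int) : Prop :=
  wanted_number ≤ number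
instance (number : Int) (wanted_number : Int) : Decidable (Pre_get_number_of_operations_to_reduce number wanted_number) := by
  unfold Pre_get_number_of_operations_to_reduce; infer_instance
def pvWitness_get_number_of_operations_to_reduce : Int × Int := (13, 2)
def Spec_get_number_of_operations_to_reduce (number : Int) (wanted_number : Int) (out : Int) : Prop := out = get_number_of_operations_to_reduce_alt number wanted_number
instance (number : Int) (wanted_number : Int) (out : Int) : Decidable (Spec_get_number_of_operations_to_reduce number wanted_number out) := by unfold Spec_get_number_of_operations_to_reduce; infer_instance

-- ===== CLAIM (what is proved, stated in full; the proofs are below) =====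
def Claim_equal_get_number_of_operations_to_reduce : Prop := ∀ (number : Int) (wanted_number : Int), Dom_get_number_of_operations_to_reduce number wanted_number → Pre_get_number_of_operations_to_reduce number wanted_number → Spec_get_number_of_operations_to_reduce number wanted_number (get_number_of_operations_to_reduce number wanted_number)

-- ===== LEMMAS AND PROOFS =====

-- ===== VERDICT (by name: the statement is the Claim_ definition above) =====
-- closed form for the greedy loop, by strong induction on the (nonnegative) difference
theorem pvLoopA_closed (k : Nat) (number wanted_number ops : Int)
    (hk : (number - wanted_number).toNat = k) (h : 0 ≤ number - wanted_number) :
    pvLoopA number wanted_number ops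
      = ops + ((number - wanted_number) / 5 + ((number - wanted_number) % 5) / 2
          + ((number - wanted_number) % 5) % 2) := by
  induction k using Nat.strong_induction_on generalizing number ops with
  | _ k ih =>
    rw [pvLoopA]
    split_ifs with h0 h5 h2 h1
    · omega
    · rw [ih ((number - 5 - wanted_number).toNat) (by omega) _ _ rfl (by omega)]
      omega
    · rw [ih ((number - 2 - wanted_number).toNat) (by omega) _ _ rfl (by omega)]
      omega
    · rw [ih ((number - 1 - wanted_number).toNat) (by omega) _ _ rfl (by omega)]
      omega
    · omega

theorem get_number_of_operations_to_reduce_spec : Claim_equal_get_number_of_operations_to_reduce := by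
  intro number wanted_number _ hpre
  unfold Spec_get_number_of_operations_to_reduce
  unfold get_number_of_operations_to_reduce get_number_of_operations_to_reduce_alt
  rw [pvLoopA_closed ((number - wanted_number).toNat) _ _ _ rfl (by exact sub_nonneg.mpr hpre)]
  simp only [PySem.Int.floordiv_eq_ediv_of_pos (by norm_num : (0:Int) < 5),
    PySem.Int.floordiv_eq_ediv_of_pos (by norm_num : (0:Int) < 2),
    PySem.Int.mod_eq_emod_of_pos (by norm_num : (0:Int) < 5),
    PySem.Int.mod_eq_emod_of_pos (by norm_num : (0:Int) < 2)]
  omega
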